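-- pv_equiv track=rewrite | github.com/amitcjmu/Stock-Analysis | backend/app/services/crewai_flows/unified_discovery_flow/data_utilities.py | _suggest_field_mappings
-- ===== SOURCE A (Python) =====
-- from typing import Any, Dict, List
--
-- def _suggest_field_mappings(field_name: str, values: List[Any]) -> List[str]:
--     """Suggest possible target field mappings"""
--     suggestions = []
--
--     # Common field name patterns
--     name_lower = field_name.lower()
--
--     if any(keyword in name_lower for keyword in ["name", "title", "label"]):
--         suggestions.append("asset_name")
--     elif any(keyword in name_lower for keyword in ["type", "category", "class"]):
--         suggestions.append("asset_type")
--     elif any(keyword in name_lower for keyword in ["id", "identifier", "key"]):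
--         suggestions.append("asset_id")
--     elif any(keyword in name_lower for keyword in ["description", "desc", "notes"]):
--         suggestions.append("description")
--     elif any(keyword in name_lower for keyword in ["status", "state", "condition"]):
--         suggestions.append("status")
--     else:
--         suggestions.append("custom_attribute")
--
--     return suggestions
-- ===== SOURCE B (Python) =====
-- from typing import Any, List
--
-- _TABLE = [
--     (["name", "title", "label"], "asset_name"),
--     (["type", "category", "class"], "asset_type"),
--     (["id", "identifier", "key"], "asset_id"),
--     (["description", "desc", "notes"], "description"),
--     (["status", "state", "condition"], "status"),
-- ]
-- # keyword -> priority of its group; priority -> target name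
-- _KW_PRIO = {kw: prio for prio, (kws, _t) in enumerate(_TABLE) for kw in kws}
-- _TARGETS = [t for _kws, t in _TABLE]
-- _MAXLEN = max(len(kw) for kw in _KW_PRIO)
--
--
-- def _suggest_field_mappings(field_name: str, values: List[Any]) -> List[str]:
--     # Enumerate every substring of bounded length once and look it up in a
--     # keyword->priority hash table, keeping the smallest priority seen; no
--     # per-keyword substring scans at all.
--     name_lower = field_name.lower()
--     n = len(name_lower)
--     best = len(_TARGETS)
--     for i in range(n):
--         for j in range(i + 1, min(i + _MAXLEN, n) + 1):
--             p = _KW_PRIO.get(name_lower[i:j])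
--             if p is not None and p < best:
--                 best = p
--     return [_TARGETS[best]] if best < len(_TARGETS) else ["custom_attribute"]
-- ===== Notes on version B (the rewrite author's own statement) =====
-- stated objective: alternative
-- what changed: Instead of testing each of the 15 keywords for substring containment branch by branch, B enumerates every substring of name_lower of length up to the longest keyword once and looks it up in a precomputed keyword-to-priority hash table, returning the target of the smallest priority found (default custom_attribute); the per-keyword substring scans of the if/elif chain disappear.
import Mathlib
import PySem

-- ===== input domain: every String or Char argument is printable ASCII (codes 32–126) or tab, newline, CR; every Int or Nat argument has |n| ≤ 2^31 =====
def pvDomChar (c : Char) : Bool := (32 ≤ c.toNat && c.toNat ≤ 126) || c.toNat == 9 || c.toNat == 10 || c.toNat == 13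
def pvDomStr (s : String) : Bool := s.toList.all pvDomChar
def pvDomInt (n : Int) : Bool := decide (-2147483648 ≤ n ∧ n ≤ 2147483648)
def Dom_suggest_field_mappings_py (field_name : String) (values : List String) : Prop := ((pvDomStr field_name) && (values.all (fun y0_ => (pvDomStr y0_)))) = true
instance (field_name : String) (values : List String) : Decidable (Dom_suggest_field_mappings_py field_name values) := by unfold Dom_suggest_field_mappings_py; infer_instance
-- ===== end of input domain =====

-- B replaces the per-keyword if/elif substring scans by a single enumeration of all
-- substrings of bounded length looked up in a keyword→priority hash table, keeping the
-- smallest priority seen (objective: alternative algorithm, same result).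

-- ===== PORT A =====
-- literal transliteration of A's if/elif chain appending to `suggestions = []`
def suggest_field_mappings_py (field_name : String) (values : List String) : List String :=
  let suggestions : List String := []
  let name_lower := PySem.Str.lower field_name
  let suggestions :=
    if ["name", "title", "label"].any (fun k => PySem.Str.isIn k name_lower) then
      suggestions ++ ["asset_name"]
    else if ["type", "category", "class"].any (fun k => PySem.Str.isIn k name_lower) then
      suggestions ++ ["asset_type"]
    else if ["id", "identifier", "key"].any (fun k => PySem.Str.isIn k name_lower) then
      suggestions ++ ["asset_id"]
    else if ["description", "desc", "notes"].any (fun k => PySem.Str.isIn k name_lower) then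
      suggestions ++ ["description"]
    else if ["status", "state", "condition"].any (fun k => PySem.Str.isIn k name_lower) then
      suggestions ++ ["status"]
    else
      suggestions ++ ["custom_attribute"]
  suggestions

-- ===== PORT B =====
-- the module-level tables of Source B: _KW_PRIO (keyword → group priority), _TARGETS, _MAXLEN
def pvKwPrio : PySem.Dict String Int := PySem.Dict.mk
  [("name", 0), ("title", 0), ("label", 0),
   ("type", 1), ("category", 1), ("class", 1),
   ("id", 2), ("identifier", 2), ("key", 2),
   ("description", 3), ("desc", 3), ("notes", 3),
   ("status", 4), ("state", 4), ("condition", 4)]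

def pvTargets : List String := ["asset_name", "asset_type", "asset_id", "description", "status"]

def pvMaxLen : Int := 11

-- transliteration of Source B: enumerate substrings name_lower[i:j] of length ≤ _MAXLEN,
-- look each up in _KW_PRIO, keep the least priority found
def suggest_field_mappings_py_alt (field_name : String) (values : List String) : List String :=
  let name_lower := PySem.Str.lower field_name
  let n : Int := PySem.Str.len name_lower
  let best : Int :=
    (PySem.List.pyRange 0 n 1).foldl (fun best i =>
      (PySem.List.pyRange (i + 1) (min (i + pvMaxLen) n + 1) 1).foldl (fun best j =>
        match PySem.Dict.get? pvKwPrio (PySem.Str.slice name_lower (some i) (some j)) with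
        | some p => if p < best then p else best
        | none => best) best) 5
  if best < 5 then [PySem.List.pyGetD pvTargets best "custom_attribute"] else ["custom_attribute"]

-- ===== PRECONDITION & SPEC =====
def Spec_suggest_field_mappings_py (field_name : String) (values : List String) (out : List String) : Prop := out = suggest_field_mappings_py_alt field_name values
instance (field_name : String) (values : List String) (out : List String) : Decidable (Spec_suggest_field_mappings_py field_name values out) := by unfold Spec_suggest_field_mappings_py; infer_instance

-- ===== CLAIM (what is proved, stated in full; the proofs are below) =====
def Claim_equal_suggest_field_mappings_py : Prop := ∀ (field_name : String) (values : List String), Dom_suggest_field_mappings_py field_name values → Spec_suggest_field_mappings_py field_name values (suggest_field_mappings_py field_name values)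

-- ===== LEMMAS AND PROOFS =====

-- the body of B's inner loop, abstracted over the lookup function
def pvStep (g : Int → Option Int) (best j : Int) : Int :=
  match g j with
  | some p => if p < best then p else best
  | none => best

lemma pvFoldStep_le (g : Int → Option Int) (js : List Int) (b : Int) :
    js.foldl (pvStep g) b ≤ b := by
  induction js generalizing b with
  | nil => exact le_refl b
  | cons j js ih =>
    refine le_trans (ih (pvStep g b j)) ?_
    unfold pvStep
    cases g j with
    | none => exact le_refl b
    | some p => dsimp only; split <;> omega

lemma pvFoldStep_min (g : Int → Option Int) (js : List Int) (b : Int)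
    (j : Int) (hj : j ∈ js) (p : Int) (hp : g j = some p) :
    js.foldl (pvStep g) b ≤ p := by
  induction js generalizing b with
  | nil => cases hj
  | cons j0 js ih =>
    rcases List.mem_cons.mp hj with h | h
    · subst h
      refine le_trans (pvFoldStep_le g js (pvStep g b j)) ?_
      unfold pvStep; rw [hp]; dsimp only; split <;> omega
    · exact ih (pvStep g b j0) h

lemma pvFoldStep_mem (g : Int → Option Int) (js : List Int) (b : Int) :
    js.foldl (pvStep g) b = b ∨ ∃ j ∈ js, g j = some (js.foldl (pvStep g) b) := by
  induction js generalizing b with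
  | nil => exact Or.inl rfl
  | cons j0 js ih =>
    rcases ih (pvStep g b j0) with h | ⟨j, hj, hp⟩
    · rw [List.foldl_cons, h]
      unfold pvStep
      cases hg : g j0 with
      | none => exact Or.inl rfl
      | some p =>
        dsimp only
        split
        · exact Or.inr ⟨j0, List.mem_cons_self, hg⟩
        · exact Or.inl rfl
    · exact Or.inr ⟨j, List.mem_cons_of_mem _ hj, hp⟩

-- lookup of the substring s[i:j] in the keyword table
def pvLook (s : String) (i j : Int) : Option Int :=
  PySem.Dict.get? pvKwPrio (PySem.Str.slice s (some i) (some j))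

-- the inner loop of B at start index i
def pvInner (s : String) (n b i : Int) : Int :=
  (PySem.List.pyRange (i + 1) (min (i + pvMaxLen) n + 1) 1).foldl (pvStep (pvLook s i)) b

lemma pvFoldInner_le (s : String) (n : Int) (is : List Int) (b : Int) :
    is.foldl (pvInner s n) b ≤ b := by
  induction is generalizing b with
  | nil => exact le_refl b
  | cons i is ih => exact le_trans (ih _) (by unfold pvInner; exact pvFoldStep_le _ _ _)

lemma pvFoldInner_min (s : String) (n : Int) (is : List Int) (b : Int)
    (i : Int) (hi : i ∈ is) (j : Int)
    (hj : j ∈ PySem.List.pyRange (i + 1) (min (i + pvMaxLen) n + 1) 1)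
    (p : Int) (hp : pvLook s i j = some p) :
    is.foldl (pvInner s n) b ≤ p := by
  induction is generalizing b with
  | nil => cases hi
  | cons i0 is ih =>
    rcases List.mem_cons.mp hi with h | h
    · subst h
      exact le_trans (pvFoldInner_le s n is _) (by unfold pvInner; exact pvFoldStep_min _ _ _ j hj p hp)
    · exact ih _ h

-- a priority found by B's double loop
def pvCand (s : String) (p : Int) : Prop :=
  ∃ i ∈ PySem.List.pyRange 0 (PySem.Str.len s) 1,
    ∃ j ∈ PySem.List.pyRange (i + 1) (min (i + pvMaxLen) (PySem.Str.len s) + 1) 1,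
      pvLook s i j = some p

lemma pvFoldInner_mem (s : String) (is : List Int) (b : Int) :
    is.foldl (pvInner s (PySem.Str.len s)) b = b ∨
      ∃ i ∈ is, ∃ j ∈ PySem.List.pyRange (i + 1) (min (i + pvMaxLen) (PySem.Str.len s) + 1) 1,
        pvLook s i j = some (is.foldl (pvInner s (PySem.Str.len s)) b) := by
  induction is generalizing b with
  | nil => exact Or.inl rfl
  | cons i0 is ih =>
    rcases ih (pvInner s (PySem.Str.len s) b i0) with h | ⟨i, hi, j, hj, hp⟩
    · rw [List.foldl_cons, h]
      have hmem := pvFoldStep_mem (pvLook s i0) (PySem.List.pyRange (i0 + 1) (min (i0 + pvMaxLen) (PySem.Str.len s) + 1) 1) b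
      rw [show (PySem.List.pyRange (i0 + 1) (min (i0 + pvMaxLen) (PySem.Str.len s) + 1) 1).foldl (pvStep (pvLook s i0)) b = pvInner s (PySem.Str.len s) b i0 from rfl] at hmem
      rcases hmem with h2 | ⟨j, hj, hp⟩
      · exact Or.inl h2
      · exact Or.inr ⟨i0, List.mem_cons_self, j, hj, hp⟩
    · exact Or.inr ⟨i, List.mem_cons_of_mem _ hi, j, hj, hp⟩

-- characterisation of the literal dict _KW_PRIO
lemma pvGet?_kwPrio (t : String) (p : Int) :
    PySem.Dict.get? pvKwPrio t = some p ↔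
      ((t = "name" ∨ t = "title" ∨ t = "label") ∧ p = 0) ∨
      ((t = "type" ∨ t = "category" ∨ t = "class") ∧ p = 1) ∨
      ((t = "id" ∨ t = "identifier" ∨ t = "key") ∧ p = 2) ∨
      ((t = "description" ∨ t = "desc" ∨ t = "notes") ∧ p = 3) ∨
      ((t = "status" ∨ t = "state" ∨ t = "condition") ∧ p = 4) := by
  rw [PySem.Dict.get?_eq_some_iff_mem_items pvKwPrio t p (by decide)]
  simp only [pvKwPrio, List.mem_cons, List.not_mem_nil, or_false, Prod.mk.injEq]
  constructor
  · rintro (⟨rfl,rfl⟩|⟨rfl,rfl⟩|⟨rfl,rfl⟩|⟨rfl,rfl⟩|⟨rfl,rfl⟩|⟨rfl,rfl⟩|⟨rfl,rfl⟩|⟨rfl,rfl⟩|⟨rfl,rfl⟩|⟨rfl,rfl⟩|⟨rfl,rfl⟩|⟨rfl,rfl⟩|⟨rfl,rfl⟩|⟨rfl,rfl⟩|⟨rfl,rfl⟩) <;> simp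
  · rintro (⟨(rfl|rfl|rfl),rfl⟩|⟨(rfl|rfl|rfl),rfl⟩|⟨(rfl|rfl|rfl),rfl⟩|⟨(rfl|rfl|rfl),rfl⟩|⟨(rfl|rfl|rfl),rfl⟩) <;> simp

-- every keyword of the table is short and nonempty, and its priority lies in [0, 5)
lemma pvKw_facts (kw : String) (p : Int) (h : PySem.Dict.get? pvKwPrio kw = some p) :
    1 ≤ kw.toList.length ∧ kw.toList.length ≤ 11 ∧ 0 ≤ p ∧ p < 5 := by
  rcases (pvGet?_kwPrio kw p).mp h with
      ⟨rfl | rfl | rfl, rfl⟩ | ⟨rfl | rfl | rfl, rfl⟩ | ⟨rfl | rfl | rfl, rfl⟩ |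
      ⟨rfl | rfl | rfl, rfl⟩ | ⟨rfl | rfl | rfl, rfl⟩ <;>
    exact ⟨by decide, by decide, by decide, by decide⟩

-- a substring hit at (i, j) is exactly an infix keyword occurrence
lemma pvCand_iff (s : String) (p : Int) :
    pvCand s p ↔ ∃ kw : String,
      PySem.Dict.get? pvKwPrio kw = some p ∧ kw.toList <:+: s.toList := by
  constructor
  · rintro ⟨i, hi, j, hj, hp⟩
    rw [PySem.List.mem_pyRange_one] at hi hj
    refine ⟨PySem.Str.slice s (some i) (some j), hp, ?_⟩
    have hb : (PySem.Str.slice s (some i) (some j)).toList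
        = PySem.List.slice s.toList (some i) (some j) := by simp
    rw [hb, PySem.List.slice_toNat s.toList hi.1 (by omega)]
    exact ((s.toList.drop i.toNat).take_prefix _).isInfix.trans
      (s.toList.drop_suffix i.toNat).isInfix
  · rintro ⟨kw, hget, u, v, huv⟩
    obtain ⟨hl1, hl2, -, -⟩ := pvKw_facts kw p hget
    have hlen : s.toList.length = u.length + kw.toList.length + v.length := by
      rw [← huv]; simp; omega
    have hn : PySem.Str.len s = (s.toList.length : Int) := by
      simp [PySem.Str.len_eq]
    refine ⟨(u.length : Int), ?_, (u.length : Int) + (kw.toList.length : Int), ?_, ?_⟩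
    · rw [PySem.List.mem_pyRange_one]; omega
    · rw [PySem.List.mem_pyRange_one]
      unfold pvMaxLen
      constructor
      · omega
      · have h1 : (u.length : Int) + (kw.toList.length : Int) ≤ (u.length : Int) + 11 := by omega
        have h2 : (u.length : Int) + (kw.toList.length : Int) ≤ (PySem.Str.len s) := by omega
        omega
    · unfold pvLook
      have hsl : PySem.Str.slice s (some (u.length : Int))
          (some ((u.length : Int) + (kw.toList.length : Int))) = kw := by
        apply String.toList_inj.mp
        have hb : (PySem.Str.slice s (some (u.length : Int))
            (some ((u.length : Int) + (kw.toList.length : Int)))).toList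
            = PySem.List.slice s.toList (some (u.length : Int))
              (some ((u.length : Int) + (kw.toList.length : Int))) := by simp
        rw [hb, ← huv, PySem.List.slice_natCast_add, List.append_assoc, List.drop_left,
          List.take_left]
      rw [hsl]; exact hget

-- the main proof: B's double loop computes the least matched group priority,
-- which is exactly the group A's if/elif chain selects
set_option maxHeartbeats 1000000 in
theorem suggest_field_mappings_py_equal (field_name : String) (values : List String) :
    suggest_field_mappings_py field_name values
      = suggest_field_mappings_py_alt field_name values := by
  have hs : suggest_field_mappings_py_alt field_name values =
      (let s := PySem.Str.lower field_name
       let best := (PySem.List.pyRange 0 (PySem.Str.len s) 1).foldl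
         (pvInner s (PySem.Str.len s)) 5
       if best < 5 then [PySem.List.pyGetD pvTargets best "custom_attribute"]
       else ["custom_attribute"]) := rfl
  set s := PySem.Str.lower field_name with hsdef
  set best := (PySem.List.pyRange 0 (PySem.Str.len s) 1).foldl
      (pvInner s (PySem.Str.len s)) 5 with hbestdef
  -- the three facts about best
  have hle : best ≤ 5 := pvFoldInner_le s _ _ 5
  have hmin : ∀ p : Int, pvCand s p → best ≤ p := by
    rintro p ⟨i, hi, j, hj, hp⟩
    exact pvFoldInner_min s _ _ 5 i hi j hj p hp
  have hmem : best = 5 ∨ pvCand s best := pvFoldInner_mem s _ 5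
  have hpos : 0 ≤ best := by
    rcases hmem with h | h
    · omega
    · obtain ⟨kw, hget, -⟩ := (pvCand_iff s best).mp h
      obtain ⟨-, -, h0, -⟩ := pvKw_facts kw best hget
      exact h0
  -- the matched-group propositions
  have hc : ∀ p : Int, pvCand s p ↔
      (p = 0 ∧ (PySem.Str.isIn "name" s = true ∨ PySem.Str.isIn "title" s = true ∨ PySem.Str.isIn "label" s = true)) ∨
      (p = 1 ∧ (PySem.Str.isIn "type" s = true ∨ PySem.Str.isIn "category" s = true ∨ PySem.Str.isIn "class" s = true)) ∨
      (p = 2 ∧ (PySem.Str.isIn "id" s = true ∨ PySem.Str.isIn "identifier" s = true ∨ PySem.Str.isIn "key" s = true)) ∨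
      (p = 3 ∧ (PySem.Str.isIn "description" s = true ∨ PySem.Str.isIn "desc" s = true ∨ PySem.Str.isIn "notes" s = true)) ∨
      (p = 4 ∧ (PySem.Str.isIn "status" s = true ∨ PySem.Str.isIn "state" s = true ∨ PySem.Str.isIn "condition" s = true)) := by
    intro p
    rw [pvCand_iff]
    constructor
    · rintro ⟨kw, hget, hinf⟩
      rcases (pvGet?_kwPrio kw p).mp hget with
          ⟨rfl | rfl | rfl, rfl⟩ | ⟨rfl | rfl | rfl, rfl⟩ | ⟨rfl | rfl | rfl, rfl⟩ |
          ⟨rfl | rfl | rfl, rfl⟩ | ⟨rfl | rfl | rfl, rfl⟩ <;>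
        simp only [PySem.Str.isIn_iff_infix]
      · exact Or.inl ⟨by trivial, Or.inl hinf⟩
      · exact Or.inl ⟨by trivial, Or.inr (Or.inl hinf)⟩
      · exact Or.inl ⟨by trivial, Or.inr (Or.inr hinf)⟩
      · exact Or.inr (Or.inl (⟨by trivial, Or.inl hinf⟩))
      · exact Or.inr (Or.inl (⟨by trivial, Or.inr (Or.inl hinf)⟩))
      · exact Or.inr (Or.inl (⟨by trivial, Or.inr (Or.inr hinf)⟩))
      · exact Or.inr (Or.inr (Or.inl (⟨by trivial, Or.inl hinf⟩)))
      · exact Or.inr (Or.inr (Or.inl (⟨by trivial, Or.inr (Or.inl hinf)⟩)))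
      · exact Or.inr (Or.inr (Or.inl (⟨by trivial, Or.inr (Or.inr hinf)⟩)))
      · exact Or.inr (Or.inr (Or.inr (Or.inl (⟨by trivial, Or.inl hinf⟩))))
      · exact Or.inr (Or.inr (Or.inr (Or.inl (⟨by trivial, Or.inr (Or.inl hinf)⟩))))
      · exact Or.inr (Or.inr (Or.inr (Or.inl (⟨by trivial, Or.inr (Or.inr hinf)⟩))))
      · exact Or.inr (Or.inr (Or.inr (Or.inr (⟨by trivial, Or.inl hinf⟩))))
      · exact Or.inr (Or.inr (Or.inr (Or.inr (⟨by trivial, Or.inr (Or.inl hinf)⟩))))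
      · exact Or.inr (Or.inr (Or.inr (Or.inr (⟨by trivial, Or.inr (Or.inr hinf)⟩))))
    · rintro (⟨rfl, h | h | h⟩ | ⟨rfl, h | h | h⟩ | ⟨rfl, h | h | h⟩ |
          ⟨rfl, h | h | h⟩ | ⟨rfl, h | h | h⟩)
      · exact ⟨"name", (pvGet?_kwPrio _ _).mpr (Or.inl ⟨Or.inl rfl, rfl⟩), (PySem.Str.isIn_iff_infix _ _).mp h⟩
      · exact ⟨"title", (pvGet?_kwPrio _ _).mpr (Or.inl ⟨Or.inr (Or.inl rfl), rfl⟩), (PySem.Str.isIn_iff_infix _ _).mp h⟩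
      · exact ⟨"label", (pvGet?_kwPrio _ _).mpr (Or.inl ⟨Or.inr (Or.inr rfl), rfl⟩), (PySem.Str.isIn_iff_infix _ _).mp h⟩
      · exact ⟨"type", (pvGet?_kwPrio _ _).mpr (Or.inr (Or.inl ⟨Or.inl rfl, rfl⟩)), (PySem.Str.isIn_iff_infix _ _).mp h⟩
      · exact ⟨"category", (pvGet?_kwPrio _ _).mpr (Or.inr (Or.inl ⟨Or.inr (Or.inl rfl), rfl⟩)), (PySem.Str.isIn_iff_infix _ _).mp h⟩
      · exact ⟨"class", (pvGet?_kwPrio _ _).mpr (Or.inr (Or.inl ⟨Or.inr (Or.inr rfl), rfl⟩)), (PySem.Str.isIn_iff_infix _ _).mp h⟩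
      · exact ⟨"id", (pvGet?_kwPrio _ _).mpr (Or.inr (Or.inr (Or.inl ⟨Or.inl rfl, rfl⟩))), (PySem.Str.isIn_iff_infix _ _).mp h⟩
      · exact ⟨"identifier", (pvGet?_kwPrio _ _).mpr (Or.inr (Or.inr (Or.inl ⟨Or.inr (Or.inl rfl), rfl⟩))), (PySem.Str.isIn_iff_infix _ _).mp h⟩
      · exact ⟨"key", (pvGet?_kwPrio _ _).mpr (Or.inr (Or.inr (Or.inl ⟨Or.inr (Or.inr rfl), rfl⟩))), (PySem.Str.isIn_iff_infix _ _).mp h⟩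
      · exact ⟨"description", (pvGet?_kwPrio _ _).mpr (Or.inr (Or.inr (Or.inr (Or.inl ⟨Or.inl rfl, rfl⟩)))), (PySem.Str.isIn_iff_infix _ _).mp h⟩
      · exact ⟨"desc", (pvGet?_kwPrio _ _).mpr (Or.inr (Or.inr (Or.inr (Or.inl ⟨Or.inr (Or.inl rfl), rfl⟩)))), (PySem.Str.isIn_iff_infix _ _).mp h⟩
      · exact ⟨"notes", (pvGet?_kwPrio _ _).mpr (Or.inr (Or.inr (Or.inr (Or.inl ⟨Or.inr (Or.inr rfl), rfl⟩)))), (PySem.Str.isIn_iff_infix _ _).mp h⟩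
      · exact ⟨"status", (pvGet?_kwPrio _ _).mpr (Or.inr (Or.inr (Or.inr (Or.inr (⟨Or.inl rfl, rfl⟩))))), (PySem.Str.isIn_iff_infix _ _).mp h⟩
      · exact ⟨"state", (pvGet?_kwPrio _ _).mpr (Or.inr (Or.inr (Or.inr (Or.inr (⟨Or.inr (Or.inl rfl), rfl⟩))))), (PySem.Str.isIn_iff_infix _ _).mp h⟩
      · exact ⟨"condition", (pvGet?_kwPrio _ _).mpr (Or.inr (Or.inr (Or.inr (Or.inr (⟨Or.inr (Or.inr rfl), rfl⟩))))), (PySem.Str.isIn_iff_infix _ _).mp h⟩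
  -- best as an if-chain over the matched groups
  have hkey : best =
      (if (PySem.Str.isIn "name" s = true ∨ PySem.Str.isIn "title" s = true ∨ PySem.Str.isIn "label" s = true) then 0
       else if (PySem.Str.isIn "type" s = true ∨ PySem.Str.isIn "category" s = true ∨ PySem.Str.isIn "class" s = true) then 1
       else if (PySem.Str.isIn "id" s = true ∨ PySem.Str.isIn "identifier" s = true ∨ PySem.Str.isIn "key" s = true) then 2
       else if (PySem.Str.isIn "description" s = true ∨ PySem.Str.isIn "desc" s = true ∨ PySem.Str.isIn "notes" s = true) then 3
       else if (PySem.Str.isIn "status" s = true ∨ PySem.Str.isIn "state" s = true ∨ PySem.Str.isIn "condition" s = true) then 4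
       else 5) := by
    split_ifs with h0 h1 h2 h3 h4
    · have := hmin 0 ((hc 0).mpr (Or.inl ⟨rfl, h0⟩)); omega
    · have hub := hmin 1 ((hc 1).mpr (Or.inr (Or.inl ⟨rfl, h1⟩)))
      rcases hmem with h5 | hcand
      · omega
      · rcases (hc best).mp hcand with ⟨hb, hg⟩ | ⟨hb, hg⟩ | ⟨hb, hg⟩ | ⟨hb, hg⟩ | ⟨hb, hg⟩
        · exact absurd hg h0
        · omega
        · omega
        · omega
        · omega
    · have hub := hmin 2 ((hc 2).mpr (Or.inr (Or.inr (Or.inl ⟨rfl, h2⟩))))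
      rcases hmem with h5 | hcand
      · omega
      · rcases (hc best).mp hcand with ⟨hb, hg⟩ | ⟨hb, hg⟩ | ⟨hb, hg⟩ | ⟨hb, hg⟩ | ⟨hb, hg⟩
        · exact absurd hg h0
        · exact absurd hg h1
        · omega
        · omega
        · omega
    · have hub := hmin 3 ((hc 3).mpr (Or.inr (Or.inr (Or.inr (Or.inl ⟨rfl, h3⟩)))))
      rcases hmem with h5 | hcand
      · omega
      · rcases (hc best).mp hcand with ⟨hb, hg⟩ | ⟨hb, hg⟩ | ⟨hb, hg⟩ | ⟨hb, hg⟩ | ⟨hb, hg⟩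
        · exact absurd hg h0
        · exact absurd hg h1
        · exact absurd hg h2
        · omega
        · omega
    · have hub := hmin 4 ((hc 4).mpr (Or.inr (Or.inr (Or.inr (Or.inr ⟨rfl, h4⟩)))))
      rcases hmem with h5 | hcand
      · omega
      · rcases (hc best).mp hcand with ⟨hb, hg⟩ | ⟨hb, hg⟩ | ⟨hb, hg⟩ | ⟨hb, hg⟩ | ⟨hb, hg⟩
        · exact absurd hg h0
        · exact absurd hg h1
        · exact absurd hg h2
        · exact absurd hg h3
        · omega
    · rcases hmem with h5 | hcand
      · omega
      · rcases (hc best).mp hcand with ⟨hb, hg⟩ | ⟨hb, hg⟩ | ⟨hb, hg⟩ | ⟨hb, hg⟩ | ⟨hb, hg⟩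
        · exact absurd hg h0
        · exact absurd hg h1
        · exact absurd hg h2
        · exact absurd hg h3
        · exact absurd hg h4
  -- reduce A to the same if-chain and compare
  have hA : suggest_field_mappings_py field_name values =
      (if (PySem.Str.isIn "name" s = true ∨ PySem.Str.isIn "title" s = true ∨ PySem.Str.isIn "label" s = true) then ["asset_name"]
       else if (PySem.Str.isIn "type" s = true ∨ PySem.Str.isIn "category" s = true ∨ PySem.Str.isIn "class" s = true) then ["asset_type"]
       else if (PySem.Str.isIn "id" s = true ∨ PySem.Str.isIn "identifier" s = true ∨ PySem.Str.isIn "key" s = true) then ["asset_id"]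
       else if (PySem.Str.isIn "description" s = true ∨ PySem.Str.isIn "desc" s = true ∨ PySem.Str.isIn "notes" s = true) then ["description"]
       else if (PySem.Str.isIn "status" s = true ∨ PySem.Str.isIn "state" s = true ∨ PySem.Str.isIn "condition" s = true) then ["status"]
       else ["custom_attribute"]) := by
    unfold suggest_field_mappings_py
    rw [← hsdef]
    simp only [List.any_cons, List.any_nil, Bool.or_false, Bool.or_eq_true, List.nil_append]
  rw [hA, hs]
  dsimp only
  rw [← hbestdef, hkey]
  split_ifs <;> first | decide | omega

-- ===== VERDICT (by name: the statement is the Claim_ definition above) =====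
theorem suggest_field_mappings_py_spec : Claim_equal_suggest_field_mappings_py := by
  intro field_name values _
  exact suggest_field_mappings_py_equal field_name values
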